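-- pv_equiv track=rewrite | github.com/ViktorKurach/System-Programming | Labwork 4/hungarian.py | contains_one_zero
-- ===== SOURCE A (Python) =====
-- def contains_one_zero(lst, marked=False):
--     res = -1
--     for i in range(0, len(lst)):
--         if (lst[i] == "0" or marked and lst[i] == "[0]") and res == -1:
--             res = i
--         elif lst[i] == "0" or marked and lst[i] == "[0]":
--             return -1
--     return res
-- ===== SOURCE B (Python) =====
-- def contains_one_zero(lst, marked=False):
--     total = lst.count("0") + (lst.count("[0]") if marked else 0)
--     if total != 1:
--         return -1
--     return lst.index("0") if "0" in lst else lst.index("[0]")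
-- ===== Notes on version B (the rewrite author's own statement) =====
-- stated objective: simpler
-- what changed: Replaces A's early-exiting stateful index scan by staged library passes: count occurrences of the target strings with list.count, return -1 unless the total is exactly 1, then locate the unique match with list.index (C-implemented passes instead of an interpreted per-element loop).
import Mathlib
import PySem

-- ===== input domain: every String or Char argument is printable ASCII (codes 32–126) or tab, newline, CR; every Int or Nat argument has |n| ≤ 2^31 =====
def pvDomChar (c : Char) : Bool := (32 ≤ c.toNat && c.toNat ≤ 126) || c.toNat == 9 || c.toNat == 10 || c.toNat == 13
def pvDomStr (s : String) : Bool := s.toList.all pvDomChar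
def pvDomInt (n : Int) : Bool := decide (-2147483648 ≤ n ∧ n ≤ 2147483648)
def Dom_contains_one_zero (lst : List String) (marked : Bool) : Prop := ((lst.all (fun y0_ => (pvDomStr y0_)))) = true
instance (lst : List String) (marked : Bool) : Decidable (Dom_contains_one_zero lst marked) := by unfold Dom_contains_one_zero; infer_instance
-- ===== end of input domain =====

-- B replaces A's early-exiting stateful index scan by staged library passes: count the
-- target strings, demand total exactly 1, then locate the unique match with list.index
-- (objective: simpler).

-- ===== PORT A =====
-- the loop body of A, over the enumerated list with accumulator res
def cozGoA (marked : Bool) : List (Int × String) → Int → Int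
  | [], res => res
  | (i, x) :: rest, res =>
    if (x == "0" || (marked && x == "[0]")) && res == -1 then cozGoA marked rest i
    else if x == "0" || (marked && x == "[0]") then -1
    else cozGoA marked rest res

def contains_one_zero (lst : List String) (marked : Bool) : Int :=
  cozGoA marked (PySem.List.enumerate lst 0) (-1)

-- ===== PORT B =====
-- Source B: total = lst.count("0") + (lst.count("[0]") if marked else 0); guard total == 1;
-- then lst.index("0") if "0" in lst else lst.index("[0]").  The index? calls are guarded
-- by membership exactly as in Source B (total = 1 guarantees the looked-up value is present),
-- so '.getD 0' is never the default and the port is exact there.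
def contains_one_zero_alt (lst : List String) (marked : Bool) : Int :=
  let total : Nat := PySem.List.count lst "0" + (if marked then PySem.List.count lst "[0]" else 0)
  if total ≠ 1 then -1
  else if lst.contains "0" then ((PySem.List.index? lst "0").getD 0 : Nat)
  else ((PySem.List.index? lst "[0]").getD 0 : Nat)

-- ===== PRECONDITION & SPEC =====
def Spec_contains_one_zero (lst : List String) (marked : Bool) (out : Int) : Prop := out = contains_one_zero_alt lst marked
instance (lst : List String) (marked : Bool) (out : Int) : Decidable (Spec_contains_one_zero lst marked out) := by unfold Spec_contains_one_zero; infer_instance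

-- ===== CLAIM (what is proved, stated in full; the proofs are below) =====
def Claim_equal_contains_one_zero : Prop := ∀ (lst : List String) (marked : Bool), Dom_contains_one_zero lst marked → Spec_contains_one_zero lst marked (contains_one_zero lst marked)

-- ===== LEMMAS AND PROOFS =====

-- once res ≠ -1, A's loop returns res unless another match occurs, in which case -1
theorem cozGoA_ne (marked : Bool) (l : List (Int × String)) (res : Int) (h : res ≠ -1) :
    cozGoA marked l res =
      if l.filter (fun p => p.2 == "0" || (marked && p.2 == "[0]")) = [] then res else -1 := by
  induction l with
  | nil => simp [cozGoA]
  | cons p rest ih =>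
    obtain ⟨i, x⟩ := p
    by_cases hc : (x == "0" || (marked && x == "[0]")) = true
    · simp [cozGoA, hc, h]
    · have hx : (x == "0" || (marked && x == "[0]")) = false := by
        rw [← Bool.not_eq_true]; exact hc
      have hf : List.filter (fun p => p.2 == "0" || (marked && p.2 == "[0]")) ((i, x) :: rest)
          = List.filter (fun p => p.2 == "0" || (marked && p.2 == "[0]")) rest := by simp [hx]
      rw [hf]; simp [cozGoA, hx, ih]

-- A's loop from res = -1 returns the index of the unique match, else -1
theorem cozGoA_start (marked : Bool) (lst : List String) (s : Int) (hs : 0 ≤ s) :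
    cozGoA marked (PySem.List.enumerate lst s) (-1) =
      match (PySem.List.enumerate lst s).filter (fun p => p.2 == "0" || (marked && p.2 == "[0]")) with
      | [] => -1
      | [p] => p.1
      | _ => -1 := by
  induction lst generalizing s with
  | nil => simp [PySem.List.enumerate_nil, cozGoA]
  | cons x xs ih =>
    rw [PySem.List.enumerate_cons]
    by_cases hc : (x == "0" || (marked && x == "[0]")) = true
    · have hsne : s ≠ -1 := by omega
      simp only [cozGoA, hc, Bool.true_and, beq_self_eq_true, if_pos, List.filter_cons]
      rw [cozGoA_ne marked _ s hsne]
      cases hrest : (PySem.List.enumerate xs (s + 1)).filter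
          (fun p => p.2 == "0" || (marked && p.2 == "[0]")) with
      | nil => simp
      | cons q qs => simp
    · have hx : (x == "0" || (marked && x == "[0]")) = false := by
        rw [← Bool.not_eq_true]; exact hc
      simp only [cozGoA, hx, Bool.false_and, Bool.false_eq_true, if_false, List.filter_cons]
      exact ih (s + 1) (by omega)

-- the length of the filtered enumerated list is B's total
theorem coz_len (marked : Bool) (lst : List String) (s : Int) :
    ((PySem.List.enumerate lst s).filter (fun p => p.2 == "0" || (marked && p.2 == "[0]"))).length
      = List.count "0" lst + (if marked then List.count "[0]" lst else 0) := by
  have h1 : ((PySem.List.enumerate lst s).filter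
        (fun p => p.2 == "0" || (marked && p.2 == "[0]"))).length
      = (lst.filter (fun x => x == "0" || (marked && x == "[0]"))).length := by
    induction lst generalizing s with
    | nil => simp [PySem.List.enumerate_nil]
    | cons x xs ih =>
      rw [PySem.List.enumerate_cons]
      simp only [List.filter_cons]
      cases hc : (x == "0" || (marked && x == "[0]")) <;> simp [hc, ih]
  rw [h1]; clear h1
  induction lst with
  | nil => simp
  | cons x xs ih =>
    simp only [List.filter_cons, List.count_cons]
    by_cases h0 : x = "0"
    · subst h0; cases marked <;> simp_all <;> omega
    · by_cases h1 : x = "[0]"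
      · subst h1; cases marked <;> simp_all <;> omega
      · have hx : (x == "0" || (marked && x == "[0]")) = false := by simp [h0, h1]
        cases marked <;> simp_all

-- if the filter is the singleton [q], q.1 is s plus the index B looks up
theorem coz_singleton (marked : Bool) (lst : List String) (s : Int) (q : Int × String)
    (h : (PySem.List.enumerate lst s).filter
        (fun p => p.2 == "0" || (marked && p.2 == "[0]")) = [q]) :
    ∃ k : Nat, q.1 = s + (k : Int) ∧
      (if lst.contains "0" then PySem.List.index? lst "0" = some k
       else PySem.List.index? lst "[0]" = some k) := by
  induction lst generalizing s with
  | nil => simp [PySem.List.enumerate_nil] at h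
  | cons x xs ih =>
    rw [PySem.List.enumerate_cons] at h
    simp only [List.filter_cons] at h
    by_cases hc : (x == "0" || (marked && x == "[0]")) = true
    · rw [if_pos hc, List.cons_eq_cons] at h
      obtain ⟨hq, hrest⟩ := h
      have hnomem : ∀ v ∈ xs, (v == "0" || (marked && v == "[0]")) = false := by
        intro v hv
        by_contra hvp
        have hvp' : (v == "0" || (marked && v == "[0]")) = true := by
          rw [← Bool.not_eq_false]; exact hvp
        obtain ⟨k, hk, rfl⟩ := (List.mem_iff_getElem).1 hv
        have hmem2 : ((s + 1 + k : Int), xs[k]) ∈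
            (PySem.List.enumerate xs (s + 1)).filter
              (fun p => p.2 == "0" || (marked && p.2 == "[0]")) := by
          refine List.mem_filter.2 ⟨?_, hvp'⟩
          exact (PySem.List.mem_enumerate_iff xs (s + 1) _).2 ⟨k, hk, rfl⟩
        rw [hrest] at hmem2
        simp at hmem2
      refine ⟨0, by simp [← hq], ?_⟩
      by_cases h0 : x = "0"
      · subst h0
        rw [if_pos (by simp)]
        exact PySem.List.index?_cons_self _ _
      · have h1 : marked = true ∧ x = "[0]" := by
          simp [h0] at hc; exact hc
        -- xs has no match at all, hence no "0"
        have hno0 : ("0" : String) ∉ xs := by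
          intro hmem
          have := hnomem "0" hmem
          simp at this
        rw [if_neg (by simp [hno0]; exact fun h => h0 h.symm)]
        rw [h1.2]
        exact PySem.List.index?_cons_self _ _
    · rw [if_neg hc] at h
      obtain ⟨k, hk1, hk2⟩ := ih (s + 1) h
      have h0 : x ≠ "0" := by
        intro h0; subst h0; simp at hc
      by_cases hm : xs.contains "0" = true
      · rw [if_pos hm] at hk2
        refine ⟨k + 1, by push_cast; omega, ?_⟩
        rw [if_pos (by simp at hm ⊢; exact Or.inr hm)]
        rw [PySem.List.index?_cons_of_ne xs h0, hk2]
        rfl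
      · rw [if_neg hm] at hk2
        -- xs has no "0"; the unique match lies in xs, so it is a "[0]" and marked holds
        have hm' : ("0" : String) ∉ xs := by simpa using hm
        have hqmem : q ∈ (PySem.List.enumerate xs (s + 1)).filter
            (fun p => p.2 == "0" || (marked && p.2 == "[0]")) := by
          rw [h]; simp
        have hqp : (q.2 == "0" || (marked && q.2 == "[0]")) = true := (List.mem_filter.1 hqmem).2
        have hqin : q.2 ∈ xs := by
          obtain ⟨j, hj, hq⟩ := (PySem.List.mem_enumerate_iff xs (s + 1) q).1
            (List.mem_filter.1 hqmem).1
          rw [hq]; exact List.getElem_mem hj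
        have hq2 : q.2 = "[0]" ∧ marked = true := by
          by_cases hq0 : q.2 = "0"
          · exact absurd (hq0 ▸ hqin) hm'
          · simp [hq0] at hqp; exact ⟨hqp.2, hqp.1⟩
        have h1 : x ≠ "[0]" := by
          intro h1; subst h1
          simp [hq2.2] at hc
        refine ⟨k + 1, by push_cast; omega, ?_⟩
        rw [if_neg (by simp [hm']; exact fun h => h0 h.symm)]
        rw [PySem.List.index?_cons_of_ne xs h1, hk2]
        rfl

-- ===== VERDICT (by name: the statement is the Claim_ definition above) =====
theorem contains_one_zero_spec : Claim_equal_contains_one_zero := by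
  intro lst marked _
  show contains_one_zero lst marked = contains_one_zero_alt lst marked
  unfold contains_one_zero
  rw [cozGoA_start marked lst 0 le_rfl]
  have hlen := coz_len marked lst 0
  simp only [contains_one_zero_alt, PySem.List.count_eq]
  cases hfil : (PySem.List.enumerate lst 0).filter
      (fun p => p.2 == "0" || (marked && p.2 == "[0]")) with
  | nil =>
    rw [hfil] at hlen
    simp only [List.length_nil] at hlen
    rw [if_pos (by omega)]
  | cons q qs =>
    cases qs with
    | nil =>
      rw [hfil] at hlen
      simp only [List.length_cons, List.length_nil] at hlen
      obtain ⟨k, hk1, hk2⟩ := coz_singleton marked lst 0 q hfil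
      rw [if_neg (by omega)]
      by_cases hmem : lst.contains "0" = true
      · rw [if_pos hmem] at hk2
        rw [if_pos hmem, hk2]
        simp [hk1]
      · rw [if_neg hmem] at hk2
        rw [if_neg hmem, hk2]
        simp [hk1]
    | cons r rs =>
      rw [hfil] at hlen
      simp only [List.length_cons] at hlen
      rw [if_pos (by omega)]
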